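-- pv_equiv track=rewrite | github.com/AlexandrKhmil/playground | playground_py/the_obserded_pin.py | mixing
-- ===== SOURCE A (Python) =====
-- def mixing(arr, s):
--     result = []
--     for i in range(0, len(arr[0])):
--         if len(arr) == 1:
--             result.append(s + arr[0][i])
--         else:
--             result += mixing(arr[1:], s + arr[0][i])
--     return result
-- ===== SOURCE B (Python) =====
-- def mixing(arr, s):
--     result = [s + c for c in arr[0]]
--     for row in arr[1:]:
--         result = [p + c for p in result for c in row]
--     return result
-- ===== Notes on version B (the rewrite author's own statement) =====
-- stated objective: simpler
-- what changed: Replaced the per-character recursion over arr[1:] with an iterative fold: seed the result from the first row and expand it by one list comprehension per remaining row.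
import Mathlib
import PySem

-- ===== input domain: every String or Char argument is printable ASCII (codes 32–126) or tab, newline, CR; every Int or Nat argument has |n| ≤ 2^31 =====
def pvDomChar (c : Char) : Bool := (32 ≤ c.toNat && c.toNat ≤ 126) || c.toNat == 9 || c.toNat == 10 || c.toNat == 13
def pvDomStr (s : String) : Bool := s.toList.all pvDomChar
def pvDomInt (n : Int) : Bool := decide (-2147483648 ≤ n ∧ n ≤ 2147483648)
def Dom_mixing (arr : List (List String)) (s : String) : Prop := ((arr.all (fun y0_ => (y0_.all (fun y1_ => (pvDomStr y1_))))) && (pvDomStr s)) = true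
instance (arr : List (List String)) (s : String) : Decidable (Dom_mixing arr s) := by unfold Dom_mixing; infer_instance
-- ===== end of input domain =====

-- B replaces A's recursion over arr[1:] with an iterative fold seeded from the first row (simpler decomposition, same output order).


-- ===== PORT A =====
-- Literal port of A: loop over the first row; for each element either append s+c
-- (single-row case) or extend with the recursive result on arr[1:].
def mixing (arr : List (List String)) (s : String) : List String :=
  match arr with
  | [] => []   -- unreachable under Pre_mixing: Python raises IndexError on arr[0]
  | row :: tail =>
    row.foldl (fun result c =>
      if tail.isEmpty then result ++ [s ++ c]
      else result ++ mixing tail (s ++ c)) []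

-- ===== PORT B =====
-- Literal port of Source B: seed from the first row, then one flatMap (nested comprehension) per remaining row.
def mixing_alt (arr : List (List String)) (s : String) : List String :=
  match arr with
  | [] => []   -- unreachable under Pre_mixing: Python raises IndexError on arr[0]
  | row0 :: rest =>
    rest.foldl (fun result row => result.flatMap (fun p => row.map (fun c => p ++ c)))
      (row0.map (fun c => s ++ c))

-- ===== PRECONDITION & SPEC =====
-- Pre_ excludes only arr = [], where the Python A raises IndexError on arr[0].
def Pre_mixing (arr : List (List String)) (s : String) : Prop := arr ≠ []
instance (arr : List (List String)) (s : String) : Decidable (Pre_mixing arr s) := by unfold Pre_mixing; infer_instance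
def pvWitness_mixing : List (List String) × String := ([["a", "b"], ["c"]], "x")

def Spec_mixing (arr : List (List String)) (s : String) (out : List String) : Prop := out = mixing_alt arr s
instance (arr : List (List String)) (s : String) (out : List String) : Decidable (Spec_mixing arr s out) := by unfold Spec_mixing; infer_instance

-- ===== CLAIM (what is proved, stated in full; the proofs are below) =====
def Claim_equal_mixing : Prop := ∀ (arr : List (List String)) (s : String), Dom_mixing arr s → Pre_mixing arr s → Spec_mixing arr s (mixing arr s)

-- ===== LEMMAS AND PROOFS =====

-- the fold step of B
def pvStep (result row : List String) : List String :=
  result.flatMap (fun p => row.map (fun c => p ++ c))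

-- A's treatment of one prefix: append it when no rows remain, else recurse.
def pvG (tail : List (List String)) (p : String) : List String :=
  if tail.isEmpty then [p] else mixing tail p

theorem pvG_nil : pvG [] = fun p => [p] := by
  funext p; simp [pvG]

theorem pvG_cons (row : List String) (tt : List (List String)) :
    pvG (row :: tt) = mixing (row :: tt) := by
  funext p; simp [pvG]

theorem mixing_cons (row : List String) (tail : List (List String)) (s : String) :
    mixing (row :: tail) s = (row.map (fun c => s ++ c)).flatMap (pvG tail) := by
  show row.foldl (fun result c =>
      if tail.isEmpty then result ++ [s ++ c]
      else result ++ mixing tail (s ++ c)) [] = _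
  by_cases h : tail.isEmpty
  · rw [List.isEmpty_iff] at h; subst h
    simp [pvG_nil, List.flatMap_def, Function.comp_def]
  · have hf : (fun (result : List String) c =>
        if tail.isEmpty then result ++ [s ++ c] else result ++ mixing tail (s ++ c))
        = fun result c => result ++ mixing tail (s ++ c) := by
      funext r c; simp [h]
    rw [hf, PySem.List.foldl_append_eq_flatMap]
    simp [pvG, h, List.flatMap_map]

theorem flatMap_g_eq_foldl (tail : List (List String)) (init : List String) :
    init.flatMap (pvG tail) = tail.foldl pvStep init := by
  induction tail generalizing init with
  | nil => simp [pvG_nil]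
  | cons row tt ih =>
    have hstep : init.flatMap (pvG (row :: tt))
        = (pvStep init row).flatMap (pvG tt) := by
      rw [pvG_cons]
      have hrow : (fun p => mixing (row :: tt) p)
          = fun p => (row.map (fun c => p ++ c)).flatMap (pvG tt) := by
        funext p; exact mixing_cons row tt p
      show init.flatMap (fun p => mixing (row :: tt) p) = _
      rw [hrow]
      simp [pvStep, List.flatMap_assoc, List.flatMap_map]
    rw [hstep, List.foldl_cons, ih]

-- ===== VERDICT (by name: the statement is the Claim_ definition above) =====
theorem mixing_spec : Claim_equal_mixing := by
  intro arr s _ hpre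
  unfold Spec_mixing
  match arr with
  | [] => exact absurd rfl hpre
  | row :: tail =>
    show mixing (row :: tail) s = mixing_alt (row :: tail) s
    rw [mixing_cons, flatMap_g_eq_foldl]
    rfl
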